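-- pv_equiv track=rewrite | github.com/betich/comp-prog | hw5.py | position_numbers
-- ===== SOURCE A (Python) =====
-- def position_numbers(n):
--     i = 1
--     a = 1
--     lst = [1]
--     while i <= n:
--         i += a
--         lst.append(i)
--         if i <= n:
--             b = 2*a + 1
--             i += b
--             lst.append(i)
--             a += 1
--     return lst
-- ===== SOURCE B (Python) =====
-- def position_numbers(n):
--     # Generalized pentagonal numbers by closed form, stopping after the first value > n.
--     lst = []
--     m = 1
--     while True:
--         k = (m + 1) // 2
--         val = k * (3 * k - 1) // 2 if m % 2 == 1 else k * (3 * k + 1) // 2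
--         lst.append(val)
--         if val > n:
--             return lst
--         m += 1
-- ===== Notes on version B (the rewrite author's own statement) =====
-- stated objective: simpler
-- what changed: B replaces A's incremental two-state recurrence (growing increments with nested conditional bookkeeping) with a single loop that computes each generalized pentagonal number directly from its closed form and stops after appending the first value exceeding n.
import Mathlib
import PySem

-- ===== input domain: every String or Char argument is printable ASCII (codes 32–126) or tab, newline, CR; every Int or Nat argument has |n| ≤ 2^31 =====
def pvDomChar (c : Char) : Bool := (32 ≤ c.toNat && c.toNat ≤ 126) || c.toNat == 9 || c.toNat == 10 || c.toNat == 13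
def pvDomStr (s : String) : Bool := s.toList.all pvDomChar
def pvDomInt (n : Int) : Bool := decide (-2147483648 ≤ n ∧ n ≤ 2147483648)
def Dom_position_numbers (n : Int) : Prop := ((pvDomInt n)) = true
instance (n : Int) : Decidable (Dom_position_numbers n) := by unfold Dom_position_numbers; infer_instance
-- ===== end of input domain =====

-- B computes each generalized pentagonal number directly by the closed form k*(3k±1)//2
-- instead of A's incremental two-state recurrence; same output list, same O(√n) cost.

-- ===== PORT A =====
-- A's while loop; state (i, a, lst); the proof argument only certifies 1 ≤ a for termination.
def loopA (n i a : Int) (lst : List Int) (ha : 1 ≤ a) : List Int :=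
  if _h : i ≤ n then
    if _h2 : i + a ≤ n then
      loopA n (i + a + (2 * a + 1)) (a + 1) ((lst ++ [i + a]) ++ [i + a + (2 * a + 1)]) (by omega)
    else lst ++ [i + a]
  else lst
termination_by (n + 1 - i).toNat
decreasing_by omega

def position_numbers (n : Int) : List Int := loopA n 1 1 [1] (by norm_num)

-- ===== PORT B =====
-- helpers: the closed form k*(3k-1)//2 (odd m) and k*(3k+1)//2 (even m)
def gpo (k : Nat) : Int := PySem.Int.floordiv ((k : Int) * (3 * (k : Int) - 1)) 2
def gpe (k : Nat) : Int := PySem.Int.floordiv ((k : Int) * (3 * (k : Int) + 1)) 2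

-- the value Source B appends at step m (k = (m+1)//2)
def pentVal (m : Nat) : Int := if m % 2 = 1 then gpo ((m + 1) / 2) else gpe ((m + 1) / 2)

theorem fd2 (t : Int) : PySem.Int.floordiv (2 * t) 2 = t := by
  rw [PySem.Int.floordiv_eq_ediv_of_pos (by norm_num)]
  exact Int.mul_ediv_cancel_left t (by norm_num)

theorem gpo_double (k : Nat) : 2 * gpo k = (k : Int) * (3 * (k : Int) - 1) := by
  rcases Nat.even_or_odd k with ⟨c, hc⟩ | ⟨c, hc⟩ <;> subst hc <;> unfold gpo
  · rw [show (((c + c : Nat) : Int) * (3 * ((c + c : Nat) : Int) - 1))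
        = 2 * ((c : Int) * (3 * ((c : Int) + (c : Int)) - 1)) from by push_cast; ring, fd2]
  · rw [show (((2 * c + 1 : Nat) : Int) * (3 * ((2 * c + 1 : Nat) : Int) - 1))
        = 2 * ((2 * (c : Int) + 1) * (3 * (c : Int) + 1)) from by push_cast; ring, fd2]

theorem gpe_double (k : Nat) : 2 * gpe k = (k : Int) * (3 * (k : Int) + 1) := by
  rcases Nat.even_or_odd k with ⟨c, hc⟩ | ⟨c, hc⟩ <;> subst hc <;> unfold gpe
  · rw [show (((c + c : Nat) : Int) * (3 * ((c + c : Nat) : Int) + 1))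
        = 2 * ((c : Int) * (3 * ((c : Int) + (c : Int)) + 1)) from by push_cast; ring, fd2]
  · rw [show (((2 * c + 1 : Nat) : Int) * (3 * ((2 * c + 1 : Nat) : Int) + 1))
        = 2 * ((2 * (c : Int) + 1) * (3 * (c : Int) + 2)) from by push_cast; ring, fd2]

-- termination of Source B's loop: the value appended at step m is at least m
theorem le_pentVal (m : Nat) (hm : 1 ≤ m) : (m : Int) ≤ pentVal m := by
  unfold pentVal
  rcases Nat.even_or_odd m with ⟨c, hc⟩ | ⟨c, hc⟩ <;> subst hc
  · have hc1 : 1 ≤ c := by omega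
    rw [if_neg (by omega), show (c + c + 1) / 2 = c from by omega]
    have hd := gpe_double c
    have h0 : (1 : Int) ≤ (c : Int) := by exact_mod_cast hc1
    push_cast
    nlinarith [hd]
  · rw [if_pos (by omega), show (2 * c + 1 + 1) / 2 = c + 1 from by omega]
    have hd := gpo_double (c + 1)
    have h0 : (0 : Int) ≤ (c : Int) := Int.natCast_nonneg c
    push_cast at hd ⊢
    nlinarith [hd]

-- Source B's while True loop; the proof argument only certifies 1 ≤ m for termination
def loopB (n : Int) (m : Nat) (lst : List Int) (hm : 1 ≤ m) : List Int :=
  if pentVal m > n then lst ++ [pentVal m]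
  else loopB n (m + 1) (lst ++ [pentVal m]) (by omega)
termination_by (n + 1 - m).toNat
decreasing_by have := le_pentVal m hm; omega

def position_numbers_alt (n : Int) : List Int := loopB n 1 [] (by norm_num)

-- ===== PRECONDITION & SPEC =====
def Spec_position_numbers (n : Int) (out : List Int) : Prop := out = position_numbers_alt n
instance (n : Int) (out : List Int) : Decidable (Spec_position_numbers n out) := by unfold Spec_position_numbers; infer_instance

-- ===== CLAIM (what is proved, stated in full; the proofs are below) =====
def Claim_equal_position_numbers : Prop := ∀ (n : Int), Dom_position_numbers n → Spec_position_numbers n (position_numbers n)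

-- ===== LEMMAS AND PROOFS =====
theorem gpe_eq (k : Nat) : gpe k = gpo k + k := by
  have h : (k : Int) * (3 * (k : Int) + 1) = (k : Int) * (3 * (k : Int) - 1) + 2 * k := by ring
  linarith [gpo_double k, gpe_double k, h]

theorem gpo_succ (k : Nat) : gpo (k + 1) = gpe k + (2 * (k : Int) + 1) := by
  have h1 := gpo_double (k + 1)
  have h2 := gpe_double k
  push_cast at h1
  have h : ((k : Int) + 1) * (3 * ((k : Int) + 1) - 1)
      = (k : Int) * (3 * (k : Int) + 1) + 2 * (2 * (k : Int) + 1) := by ring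
  linarith

theorem pentVal_odd (k : Nat) (hk : 1 ≤ k) : pentVal (2 * k - 1) = gpo k := by
  unfold pentVal
  rw [if_pos (by omega), show (2 * k - 1 + 1) / 2 = k from by omega]

theorem pentVal_even (k : Nat) (hk : 1 ≤ k) : pentVal (2 * k) = gpe k := by
  unfold pentVal
  rw [if_neg (by omega), show (2 * k + 1) / 2 = k from by omega]

theorem loopB_congr (n : Int) (m m' : Nat) (lst : List Int) (h : 1 ≤ m) (h' : 1 ≤ m')
    (hmm : m = m') : loopB n m lst h = loopB n m' lst h' := by subst hmm; rfl

theorem main (n : Int) : ∀ (fuel k : Nat) (hk : 1 ≤ k) (acc : List Int)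
    (hf : (n + 1 - gpo k).toNat ≤ fuel),
    loopA n (gpo k) (k : Int) (acc ++ [gpo k]) (by exact_mod_cast hk)
      = loopB n (2 * k - 1) acc (by omega) := by
  intro fuel
  induction fuel with
  | zero =>
    intro k hk acc hf
    have hgt : ¬ gpo k ≤ n := by omega
    rw [loopA, dif_neg hgt, loopB, if_pos (by rw [pentVal_odd k hk]; omega),
      pentVal_odd k hk]
  | succ f ih =>
    intro k hk acc hf
    have e1 := gpe_eq k
    have e2 := gpo_succ k
    rw [loopA, loopB, pentVal_odd k hk]
    by_cases h : gpo k ≤ n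
    · rw [dif_pos h, if_neg (by omega)]
      rw [loopB_congr n (2 * k - 1 + 1) (2 * k) (acc ++ [gpo k]) (by omega) (by omega) (by omega)]
      rw [loopB, pentVal_even k hk]
      by_cases h2 : gpe k ≤ n
      · rw [if_neg (by omega)]
        have harg : gpo k + (k : Int) = gpe k := by linarith
        rw [dif_pos (by omega : gpo k + (k : Int) ≤ n)]
        have hrec := ih (k + 1) (by omega) ((acc ++ [gpo k]) ++ [gpe k]) (by omega)
        push_cast at hrec
        rw [loopB_congr n (2 * (k + 1) - 1) (2 * k + 1) ((acc ++ [gpo k]) ++ [gpe k]) (by omega) (by omega) (by omega)] at hrec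
        rw [show gpo k + (k : Int) + (2 * (k : Int) + 1) = gpo (k + 1) from by linarith,
          harg]
        exact hrec
      · rw [dif_neg (by omega : ¬ gpo k + (k : Int) ≤ n), if_pos (by omega),
          show gpo k + (k : Int) = gpe k from by linarith]
    · rw [dif_neg h, if_pos (by omega)]

theorem gpo_one : gpo 1 = 1 := by
  have := gpo_double 1
  omega

-- ===== VERDICT (by name: the statement is the Claim_ definition above) =====
theorem position_numbers_spec : Claim_equal_position_numbers := by
  intro n _
  unfold Spec_position_numbers position_numbers position_numbers_alt
  have h := main n (n + 1 - gpo 1).toNat 1 (by norm_num) [] (le_refl _)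
  simpa [gpo_one] using h
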